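-- pv_equiv track=rewrite | github.com/GodoiKkj/Green-Data-Center-Manager | Tkinker/main.py | redistribute_load
-- ===== SOURCE A (Python) =====
-- def redistribute_load(server_loads, max_capacity=200000):
--     """
--     Redistribui a carga dos servidores caso algum ultrapasse a capacidade máxima.
--
--     Args:
--         server_loads (list): Lista com a carga atual de cada servidor.
--         max_capacity (int): Capacidade máxima de cada servidor.
--
--     Returns:
--         list: Lista de cargas ajustadas após a redistribuição.
--     """
--     while any(load > max_capacity for load in server_loads):
--         for i, load in enumerate(server_loads):
--             if load > max_capacity:
--                 excess = load - max_capacity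
--                 server_loads[i] = max_capacity  # Limita o servidor sobrecarregado
--                 # Redistribuir o excesso para outros servidores com espaço disponível
--                 for j, other_load in enumerate(server_loads):
--                     if i != j and other_load < max_capacity:
--                         available_space = max_capacity - other_load
--                         transfer = min(excess, available_space)
--                         server_loads[j] += transfer
--                         excess -= transfer
--                         if excess == 0:
--                             break
--     return server_loads
-- ===== SOURCE B (Python) =====
-- def redistribute_load(server_loads, max_capacity=200000):
--     """Single left-to-right pass with a monotonic frontier pointer to the
--     lowest-index non-full server; each overloaded server is capped and its
--     excess poured into servers from the frontier on (excess that fits nowhere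
--     is dropped, as in the original). Mutates server_loads in place."""
--     n = len(server_loads)
--     f = 0  # every index < f is already at (or above) max_capacity
--     for i in range(n):
--         if server_loads[i] > max_capacity:
--             excess = server_loads[i] - max_capacity
--             server_loads[i] = max_capacity
--             while excess > 0 and f < n:
--                 space = max_capacity - server_loads[f]
--                 if space > 0:
--                     t = excess if excess < space else space
--                     server_loads[f] += t
--                     excess -= t
--                     if excess > 0:
--                         f += 1
--                 else:
--                     f += 1
--     return server_loads
-- ===== Notes on version B (the rewrite author's own statement) =====
-- stated objective: faster
-- what changed: Replaced the while-loop with restarting inner scans from index 0 by one left-to-right pass that keeps a monotonic frontier pointer to the lowest-index non-full server, so excess is poured in amortized O(n) instead of re-scanning.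
import Mathlib
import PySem

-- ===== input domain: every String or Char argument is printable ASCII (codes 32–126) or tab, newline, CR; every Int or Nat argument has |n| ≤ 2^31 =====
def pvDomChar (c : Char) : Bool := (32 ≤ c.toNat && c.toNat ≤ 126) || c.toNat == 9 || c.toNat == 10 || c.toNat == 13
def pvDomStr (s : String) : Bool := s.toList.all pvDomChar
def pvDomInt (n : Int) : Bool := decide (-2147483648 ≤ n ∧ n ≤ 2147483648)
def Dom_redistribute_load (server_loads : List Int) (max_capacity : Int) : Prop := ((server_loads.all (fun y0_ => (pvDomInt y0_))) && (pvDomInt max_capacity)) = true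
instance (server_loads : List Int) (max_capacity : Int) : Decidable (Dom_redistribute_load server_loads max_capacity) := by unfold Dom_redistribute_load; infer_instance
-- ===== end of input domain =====

-- B replaces A's restart-from-0 inner scans by a single pass with a monotonic
-- frontier pointer (amortized O(n)); both mutate the list in Python, the
-- equivalence proved here is about the return value.


-- ===== PORT A =====
-- the inner 'for j, other_load in enumerate(...)' distribution loop of A:
-- the enumeration is the index list js (called with range(len)); transfer =
-- min(excess, max_capacity - other_load) is written inline
def distA (cap : Int) (i : Nat) (excess : Int) (js : List Nat) (xs : List Int) : List Int :=
  match js with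
  | [] => xs
  | j :: rest =>
    if i ≠ j ∧ xs.getD j 0 < cap then
      if excess - min excess (cap - xs.getD j 0) = 0 then
        xs.set j (xs.getD j 0 + min excess (cap - xs.getD j 0))
      else
        distA cap i (excess - min excess (cap - xs.getD j 0)) rest
          (xs.set j (xs.getD j 0 + min excess (cap - xs.getD j 0)))
    else distA cap i excess rest xs

-- the outer 'for i, load in enumerate(server_loads)' loop of A
def passA (cap : Int) (is : List Nat) (xs : List Int) : List Int :=
  match is with
  | [] => xs
  | i :: rest =>
    if xs.getD i 0 > cap then
      passA cap rest (distA cap i (xs.getD i 0 - cap) (List.range xs.length) (xs.set i cap))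
    else passA cap rest xs

-- the 'while any(load > max_capacity ...)' loop; fuel length+1 suffices
-- because one body pass leaves no load above cap (proved below)
def loopA (fuel : Nat) (cap : Int) (xs : List Int) : List Int :=
  match fuel with
  | 0 => xs
  | fuel+1 =>
    if xs.any (fun l => l > cap) then loopA fuel cap (passA cap (List.range xs.length) xs)
    else xs

def redistribute_load (server_loads : List Int) (max_capacity : Int) : List Int :=
  loopA (server_loads.length + 1) max_capacity server_loads

-- ===== PORT B =====
-- B's 'while excess > 0 and f < n' pouring loop; the monotone frontier
-- pointer f is represented by the list of indices from f on (exact, since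
-- f only ever increases); returns (loads, remaining frontier)
def distB (cap : Int) (excess : Int) (fs : List Nat) (xs : List Int) : List Int × List Nat :=
  match fs with
  | [] => (xs, [])
  | f :: rest =>
    if excess > 0 then
      if cap - xs.getD f 0 > 0 then
        if excess - min excess (cap - xs.getD f 0) > 0 then
          distB cap (excess - min excess (cap - xs.getD f 0)) rest
            (xs.set f (xs.getD f 0 + min excess (cap - xs.getD f 0)))
        else (xs.set f (xs.getD f 0 + min excess (cap - xs.getD f 0)), f :: rest)
      else distB cap excess rest xs
    else (xs, f :: rest)

-- the single left-to-right 'for i in range(n)' pass of B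
def passB (cap : Int) (is fs : List Nat) (xs : List Int) : List Int :=
  match is with
  | [] => xs
  | i :: rest =>
    if xs.getD i 0 > cap then
      passB cap rest (distB cap (xs.getD i 0 - cap) fs (xs.set i cap)).2
        (distB cap (xs.getD i 0 - cap) fs (xs.set i cap)).1
    else passB cap rest fs xs

def redistribute_load_alt (server_loads : List Int) (max_capacity : Int) : List Int :=
  passB max_capacity (List.range server_loads.length) (List.range server_loads.length)
    server_loads

-- ===== PRECONDITION & SPEC =====
def Spec_redistribute_load (server_loads : List Int) (max_capacity : Int) (out : List Int) : Prop := out = redistribute_load_alt server_loads max_capacity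
instance (server_loads : List Int) (max_capacity : Int) (out : List Int) : Decidable (Spec_redistribute_load server_loads max_capacity out) := by unfold Spec_redistribute_load; infer_instance

-- ===== CLAIM (what is proved, stated in full; the proofs are below) =====
def Claim_equal_redistribute_load : Prop := ∀ (server_loads : List Int) (max_capacity : Int), Dom_redistribute_load server_loads max_capacity → Spec_redistribute_load server_loads max_capacity (redistribute_load server_loads max_capacity)

-- ===== LEMMAS AND PROOFS =====

theorem getD_set_self (xs : List Int) (n : Nat) (v : Int) (h : n < xs.length) :
    (xs.set n v).getD n 0 = v := by
  rw [List.getD, List.getElem?_set_self h]; rfl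

theorem getD_set_ne (xs : List Int) (n : Nat) (v : Int) (k : Nat) (h : n ≠ k) :
    (xs.set n v).getD k 0 = xs.getD k 0 := by
  rw [List.getD, List.getElem?_set_ne h, List.getD]

theorem distA_length (cap : Int) (i : Nat) (excess : Int) (js : List Nat) (xs : List Int) :
    (distA cap i excess js xs).length = xs.length := by
  fun_induction distA <;> simp_all

theorem distB_length (cap : Int) (excess : Int) (fs : List Nat) (xs : List Int) :
    (distB cap excess fs xs).1.length = xs.length := by
  fun_induction distB <;> simp_all

-- an entry that is ≤ cap stays ≤ cap through distA
theorem distA_le (cap : Int) (i : Nat) (excess : Int) (js : List Nat) (xs : List Int)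
    (k : Nat) (hk : xs.getD k 0 ≤ cap) : (distA cap i excess js xs).getD k 0 ≤ cap := by
  fun_induction distA generalizing k with
  | case1 => exact hk
  | case2 excess xs j rest hcond hz =>
    by_cases hkj : j = k
    · subst hkj
      by_cases hjlen : j < xs.length
      · rw [getD_set_self _ _ _ hjlen]; omega
      · rw [List.getD, List.getElem?_eq_none (by simp; omega)]
        rw [List.getD, List.getElem?_eq_none (by omega)] at hk
        exact hk
    · rwa [getD_set_ne _ _ _ _ hkj]
  | case3 excess xs j rest hcond hz ih =>
    apply ih
    by_cases hkj : j = k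
    · subst hkj
      by_cases hjlen : j < xs.length
      · rw [getD_set_self _ _ _ hjlen]; omega
      · rw [List.getD, List.getElem?_eq_none (by simp; omega)]
        rw [List.getD, List.getElem?_eq_none (by omega)] at hk
        exact hk
    · rwa [getD_set_ne _ _ _ _ hkj]
  | case4 excess xs j rest hcond ih => exact ih k hk

-- after one full pass of A over range(len), every entry is ≤ cap
theorem passA_clears (cap : Int) (is : List Nat) (xs : List Int)
    (h : ∀ k, k < xs.length → k ∉ is → xs.getD k 0 ≤ cap) :
    ∀ k, k < (passA cap is xs).length → (passA cap is xs).getD k 0 ≤ cap := by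
  fun_induction passA with
  | case1 xs => simpa [passA] using fun k hk => h k hk (by simp)
  | case2 xs i rest hload ih =>
    apply ih
    intro k hk hkrest
    rw [distA_length, List.length_set] at hk
    apply distA_le
    by_cases hki : k = i
    · subst hki; rw [getD_set_self _ _ _ hk]
    · rw [getD_set_ne _ _ _ _ (by omega)]
      exact h k hk (by simp [hkrest]; omega)
  | case3 xs i rest hload ih =>
    apply ih
    intro k hk hkrest
    by_cases hki : k = i
    · subst hki; omega
    · exact h k hk (by simp [hkrest]; omega)

theorem passA_id (cap : Int) (is : List Nat) (xs : List Int)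
    (h : ∀ k, k < xs.length → xs.getD k 0 ≤ cap)
    (his : ∀ i, i ∈ is → i < xs.length) : passA cap is xs = xs := by
  fun_induction passA with
  | case1 => rfl
  | case2 xs i rest hload ih =>
    exact absurd (h i (his i (by simp))) (by omega)
  | case3 xs i rest hload ih =>
    exact ih h (fun j hj => his j (by simp [hj]))

-- distA skips every index whose entry is already ≥ cap
theorem distA_skip (cap : Int) (i : Nat) (excess : Int) (p fs : List Nat) (xs : List Int)
    (hfull : ∀ j, j ∈ p → cap ≤ xs.getD j 0) :
    distA cap i excess (p ++ fs) xs = distA cap i excess fs xs := by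
  induction p with
  | nil => rfl
  | cons j p ih =>
    have hj := hfull j (by simp)
    rw [List.cons_append, distA]
    rw [if_neg (fun hc => absurd hc.2 (by omega))]
    exact ih (fun m hm => hfull m (by simp [hm]))

-- entries already ≥ cap stay ≥ cap through distB (loads only grow)
theorem distB_mono (cap : Int) (excess : Int) (fs : List Nat) (xs : List Int) (k : Nat)
    (hk : cap ≤ xs.getD k 0) : cap ≤ (distB cap excess fs xs).1.getD k 0 := by
  fun_induction distB generalizing k with
  | case1 => exact hk
  | case2 excess xs f rest hex hspace hrec ih =>
    apply ih
    by_cases hkf : f = k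
    · subst hkf
      by_cases hflen : f < xs.length
      · rw [getD_set_self _ _ _ hflen]; omega
      · rw [List.getD, List.getElem?_eq_none (by simp; omega)]
        rw [List.getD, List.getElem?_eq_none (by omega)] at hk
        omega
    · rwa [getD_set_ne _ _ _ _ hkf]
  | case3 excess xs f rest hex hspace hrec =>
    by_cases hkf : f = k
    · subst hkf
      by_cases hflen : f < xs.length
      · rw [getD_set_self _ _ _ hflen]; omega
      · rw [List.getD, List.getElem?_eq_none (by simp; omega)]
        rw [List.getD, List.getElem?_eq_none (by omega)] at hk
        omega
    · rwa [getD_set_ne _ _ _ _ hkf]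
  | case4 excess xs f rest hex hspace ih => exact ih k hk
  | case5 => exact hk

-- the core alignment: A's eligible-scan distribution equals B's frontier one,
-- the frontier only moves forward, and everything it passed is full
theorem dist_eq (cap : Int) (i : Nat) (excess : Int) (fs : List Nat) (xs : List Int)
    (hex : 0 < excess) (hilen : i < xs.length) (hi : cap ≤ xs.getD i 0)
    (hfs : ∀ j, j ∈ fs → j < xs.length) :
    distA cap i excess fs xs = (distB cap excess fs xs).1 ∧
    (∃ q, fs = q ++ (distB cap excess fs xs).2 ∧
      ∀ j, j ∈ q → cap ≤ (distB cap excess fs xs).1.getD j 0) ∧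
    cap ≤ (distB cap excess fs xs).1.getD i 0 := by
  induction fs generalizing excess xs with
  | nil => exact ⟨rfl, ⟨[], rfl, by simp⟩, hi⟩
  | cons f rest ih =>
    have hflen : f < xs.length := hfs f (by simp)
    have hrest : ∀ j, j ∈ rest → j < xs.length := fun j hj => hfs j (by simp [hj])
    rw [distB, if_pos (show excess > 0 by omega)]
    by_cases hspace : cap - xs.getD f 0 > 0
    · rw [if_pos hspace]
      have hine : i ≠ f := fun h => by rw [← h] at hspace; omega
      have hcondA : i ≠ f ∧ xs.getD f 0 < cap := ⟨hine, by omega⟩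
      have hset_i : cap ≤ (xs.set f (xs.getD f 0 + min excess (cap - xs.getD f 0))).getD i 0 := by
        rw [getD_set_ne _ _ _ _ (fun h => hine h.symm)]; exact hi
      have hset_len : i < (xs.set f (xs.getD f 0 + min excess (cap - xs.getD f 0))).length := by
        simpa using hilen
      by_cases hrec : excess - min excess (cap - xs.getD f 0) > 0
      · rw [if_pos hrec, distA, if_pos hcondA,
            if_neg (show ¬ excess - min excess (cap - xs.getD f 0) = 0 by omega)]
        obtain ⟨h1, ⟨q, hq, hqfull⟩, h3⟩ :=
          ih _ _ hrec hset_len hset_i (fun j hj => by simpa using hrest j hj)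
        refine ⟨h1, ⟨f :: q, by rw [List.cons_append, ← hq], ?_⟩, h3⟩
        intro j hj
        rcases List.mem_cons.mp hj with hjf | hjq
        · subst hjf
          apply distB_mono
          rw [getD_set_self _ _ _ hflen]; omega
        · exact hqfull j hjq
      · rw [if_neg hrec, distA, if_pos hcondA,
            if_pos (show excess - min excess (cap - xs.getD f 0) = 0 by omega)]
        exact ⟨rfl, ⟨[], rfl, by simp⟩, hset_i⟩
    · rw [if_neg hspace, distA,
          if_neg (show ¬ (i ≠ f ∧ xs.getD f 0 < cap) from fun hc => absurd hc.2 (by omega))]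
      obtain ⟨h1, ⟨q, hq, hqfull⟩, h3⟩ := ih _ _ hex hilen hi hrest
      refine ⟨h1, ⟨f :: q, by rw [List.cons_append, ← hq], ?_⟩, h3⟩
      intro j hj
      rcases List.mem_cons.mp hj with hjf | hjq
      · subst hjf; exact distB_mono _ _ _ _ _ (by omega)
      · exact hqfull j hjq

-- A's pass equals B's pass: the indices the frontier has passed are exactly
-- a full prefix of range(len)
theorem pass_eq (cap : Int) (is fs : List Nat) (xs : List Int)
    (his : ∀ i, i ∈ is → i < xs.length)
    (hinv : ∃ p, List.range xs.length = p ++ fs ∧ ∀ j, j ∈ p → cap ≤ xs.getD j 0) :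
    passA cap is xs = passB cap is fs xs := by
  induction is generalizing fs xs with
  | nil => rfl
  | cons i rest ih =>
    obtain ⟨p, hp, hpfull⟩ := hinv
    have hilen : i < xs.length := his i (by simp)
    have hfs : ∀ j, j ∈ fs → j < xs.length := by
      intro j hj
      have : j ∈ List.range xs.length := by rw [hp]; exact List.mem_append.mpr (Or.inr hj)
      exact List.mem_range.mp this
    rw [passA, passB]
    by_cases hload : xs.getD i 0 > cap
    · rw [if_pos hload, if_pos hload]
      have hset_i : cap ≤ (xs.set i cap).getD i 0 := by rw [getD_set_self _ _ _ hilen]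
      have hset_full : ∀ j, j ∈ p → cap ≤ (xs.set i cap).getD j 0 := by
        intro j hj
        by_cases hji : i = j
        · subst hji; rw [getD_set_self _ _ _ hilen]
        · rw [getD_set_ne _ _ _ _ hji]; exact hpfull j hj
      obtain ⟨h1, ⟨q, hq, hqfull⟩, _⟩ :=
        dist_eq cap i (xs.getD i 0 - cap) fs (xs.set i cap) (by omega) (by simpa using hilen)
          hset_i (fun j hj => by simpa using hfs j hj)
      rw [hp, distA_skip cap i _ p fs _ hset_full, h1]
      refine ih _ _ ?_ ?_
      · intro j hj
        rw [distB_length, List.length_set]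
        exact his j (by simp [hj])
      · refine ⟨p ++ q, ?_, ?_⟩
        · rw [distB_length, List.length_set, hp, List.append_assoc]
          exact congrArg _ hq
        · intro j hj
          rcases List.mem_append.mp hj with hjp | hjq
          · exact distB_mono _ _ _ _ _ (hset_full j hjp)
          · exact hqfull j hjq
    · rw [if_neg hload, if_neg hload]
      exact ih _ _ (fun j hj => his j (by simp [hj])) ⟨p, hp, hpfull⟩

theorem loopA_stop (fuel : Nat) (cap : Int) (xs : List Int)
    (h : ¬ xs.any (fun l => l > cap) = true) : loopA fuel cap xs = xs := by
  cases fuel <;> simp [loopA, h]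

theorem any_iff (cap : Int) (xs : List Int) :
    xs.any (fun l => l > cap) = true ↔ ∃ k, k < xs.length ∧ cap < xs.getD k 0 := by
  simp [List.any_eq_true]
  constructor
  · rintro ⟨x, hx, hlt⟩
    obtain ⟨k, hk, hget⟩ := List.getElem_of_mem hx
    exact ⟨k, hk, by simp [List.getElem?_eq_getElem hk, hget]; omega⟩
  · rintro ⟨k, hk, hlt⟩
    refine ⟨xs.getD k 0, ?_, hlt⟩
    rw [List.getD, List.getElem?_eq_getElem hk]
    exact List.getElem_mem hk

-- ===== VERDICT (by name: the statement is the Claim_ definition above) =====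
theorem redistribute_load_spec : Claim_equal_redistribute_load := by
  intro xs cap _
  unfold Spec_redistribute_load redistribute_load redistribute_load_alt
  rw [← pass_eq cap (List.range xs.length) (List.range xs.length) xs
        (fun i hi => List.mem_range.mp hi) ⟨[], rfl, by simp⟩]
  unfold loopA
  by_cases hany : xs.any (fun l => l > cap) = true
  · simp only [hany, if_pos]
    have hclear := passA_clears cap (List.range xs.length) xs
      (fun k hk hknot => absurd (List.mem_range.mpr hk) hknot)
    have : ¬ (passA cap (List.range xs.length) xs).any (fun l => l > cap) = true := by
      rw [any_iff]
      rintro ⟨k, hk, hlt⟩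
      exact absurd (hclear k hk) (by omega)
    exact loopA_stop _ _ _ this
  · have h : ∀ k, k < xs.length → xs.getD k 0 ≤ cap := by
      intro k hk
      by_contra hc
      exact hany ((any_iff cap xs).mpr ⟨k, hk, by omega⟩)
    rw [if_neg hany, passA_id cap (List.range xs.length) xs h (fun i hi => List.mem_range.mp hi)]
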